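-- pv_equiv track=rewrite | github.com/SantoshBh137/Purdue_Analysis_EFT | EFT_minitree/Event_weight_prediction1.py | generate_weight_configurations
-- ===== SOURCE A (Python) =====
-- def generate_weight_configurations(num_WCs):
--     """
--     Generates the Wilson coefficient configurations for the 153 weights.
--     """
--     weight_configs = []
--     weight_configs.append([0] * num_WCs)  # First row of all zeros
--
--     for i in range(num_WCs):
--         config = [0] * num_WCs
--         config[i] = 1
--         weight_configs.append(config)
--
--     for i in range(num_WCs):
--         config = [0] * num_WCs
--         config[i] = 2
--         weight_configs.append(config)
--
--         for j in range(i + 1, num_WCs):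
--             config = [0] * num_WCs
--             config[i] = 1
--             config[j] = 1
--             weight_configs.append(config)
--
--     return weight_configs
-- ===== SOURCE B (Python) =====
-- def _cwr(lo, n, d):
--     """Combinations with replacement of range(lo, n), length d, lexicographic."""
--     if d == 0:
--         return [()]
--     return [(i,) + rest for i in range(lo, n) for rest in _cwr(i, n, d - 1)]
--
--
-- def generate_weight_configurations(num_WCs):
--     """
--     Generates the Wilson coefficient configurations for the 153 weights.
--     """
--     weight_configs = []
--     for d in range(3):
--         for combo in _cwr(0, num_WCs, d):
--             config = [0] * num_WCs
--             for idx in combo: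
--                 config[idx] += 1
--             weight_configs.append(config)
--     return weight_configs
-- ===== Notes on version B (the rewrite author's own statement) =====
-- stated objective: alternative
-- what changed: Replaces A's three hand-written blocks (all-zeros row, single-1 loop, diagonal-2 plus i<j pair loop) by one uniform pass over degrees 0..2 of recursively generated combinations-with-replacement, each row built by incrementing a zero vector at the combination's indices.
import Mathlib
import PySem

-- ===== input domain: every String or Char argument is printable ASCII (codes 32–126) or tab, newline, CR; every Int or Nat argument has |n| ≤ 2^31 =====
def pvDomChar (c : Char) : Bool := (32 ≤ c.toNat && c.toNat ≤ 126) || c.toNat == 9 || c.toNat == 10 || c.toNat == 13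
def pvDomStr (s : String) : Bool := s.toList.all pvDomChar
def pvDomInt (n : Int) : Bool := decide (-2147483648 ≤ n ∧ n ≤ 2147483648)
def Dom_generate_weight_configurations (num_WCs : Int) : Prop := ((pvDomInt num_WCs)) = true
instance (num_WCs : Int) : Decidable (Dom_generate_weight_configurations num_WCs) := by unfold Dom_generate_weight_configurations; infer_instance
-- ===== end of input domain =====

-- B replaces A's three hand-written blocks by one uniform degree-0..2 combinations-with-replacement pass (alternative decomposition, same cost).

-- ===== PORT A =====
def generate_weight_configurations (num_WCs : Int) : List (List Int) :=
  -- weight_configs = []; weight_configs.append([0]*num_WCs)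
  let wc0 : List (List Int) := [List.replicate num_WCs.toNat 0]
  -- first loop: config = [0]*num_WCs; config[i] = 1; append
  let wc1 := (PySem.List.pyRange 0 num_WCs 1).foldl
    (fun acc i => acc ++ [(List.replicate num_WCs.toNat (0:Int)).set i.toNat 1]) wc0
  -- second loop: diagonal 2, then i<j pairs
  let wc2 := (PySem.List.pyRange 0 num_WCs 1).foldl
    (fun acc i =>
      let acc := acc ++ [(List.replicate num_WCs.toNat (0:Int)).set i.toNat 2]
      (PySem.List.pyRange (i+1) num_WCs 1).foldl
        (fun acc j => acc ++ [((List.replicate num_WCs.toNat (0:Int)).set i.toNat 1).set j.toNat 1]) acc) wc1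
  wc2

-- ===== PORT B =====
-- _cwr(lo, n, d): combinations with replacement of range(lo, n), length d, lexicographic
def pvCwr (lo num : Int) : Nat → List (List Int)
  | 0 => [[]]
  | d+1 => (PySem.List.pyRange lo num 1).flatMap (fun i => (pvCwr i num d).map (i :: ·))

def generate_weight_configurations_alt (num_WCs : Int) : List (List Int) :=
  ([0, 1, 2] : List Nat).flatMap (fun d =>
    (pvCwr 0 num_WCs d).map (fun combo =>
      combo.foldl (fun cfg idx => cfg.modify idx.toNat (· + 1)) (List.replicate num_WCs.toNat (0:Int))))

-- ===== PRECONDITION & SPEC =====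
def Spec_generate_weight_configurations (num_WCs : Int) (out : List (List Int)) : Prop := out = generate_weight_configurations_alt num_WCs
instance (num_WCs : Int) (out : List (List Int)) : Decidable (Spec_generate_weight_configurations num_WCs out) := by unfold Spec_generate_weight_configurations; infer_instance

-- ===== CLAIM (what is proved, stated in full; the proofs are below) =====
def Claim_equal_generate_weight_configurations : Prop := ∀ (num_WCs : Int), Dom_generate_weight_configurations num_WCs → Spec_generate_weight_configurations num_WCs (generate_weight_configurations num_WCs)

-- ===== LEMMAS AND PROOFS =====

-- incrementing a zero entry is setting it to 1
theorem pv_modify_rep (n a : Nat) :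
    (List.replicate n (0:Int)).modify a (· + 1) = (List.replicate n (0:Int)).set a 1 := by
  apply List.ext_getElem?
  intro j
  simp only [List.getElem?_modify, List.getElem?_set, List.getElem?_replicate, List.length_replicate]
  by_cases h : a = j
  · subst h
    by_cases hj : a < n <;> simp [hj]
  · simp [h]

-- incrementing the already-set entry yields 2
theorem pv_modify_set_self (n a : Nat) :
    ((List.replicate n (0:Int)).set a 1).modify a (· + 1) = (List.replicate n (0:Int)).set a 2 := by
  apply List.ext_getElem?
  intro j
  simp only [List.getElem?_modify, List.getElem?_set, List.getElem?_replicate, List.length_replicate]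
  by_cases h : a = j
  · subst h
    by_cases hj : a < n <;> simp [hj]
  · simp [h]

-- incrementing a different (still zero) entry is setting it to 1
theorem pv_modify_set_ne (n a b : Nat) (hab : a ≠ b) :
    ((List.replicate n (0:Int)).set a 1).modify b (· + 1) =
      ((List.replicate n (0:Int)).set a 1).set b 1 := by
  apply List.ext_getElem?
  intro j
  simp only [List.getElem?_modify, List.getElem?_set, List.getElem?_replicate, List.length_replicate]
  by_cases h : b = j
  · subst h
    by_cases ha : a = b
    · exact absurd ha hab
    · by_cases hj : b < n <;> simp [ha, hj]
  · simp [h]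

-- flatMap of singletons is map
theorem pv_flatMap_sing {α β : Type} (l : List α) (f : α → List β) :
    l.flatMap (fun x => [f x]) = l.map f := by
  induction l with
  | nil => rfl
  | cons a l ih => simp [List.flatMap_cons, ih]

-- ===== VERDICT (by name: the statement is the Claim_ definition above) =====
theorem generate_weight_configurations_spec : Claim_equal_generate_weight_configurations := by
  intro num _
  show _ = _
  -- normalise B to a concatenation of three degree blocks
  simp only [generate_weight_configurations_alt, pvCwr, List.flatMap_cons, List.flatMap_nil,
    List.map_cons, List.map_nil, List.append_nil, List.map_flatMap, List.map_map,
    List.foldl_cons, List.foldl_nil, Function.comp_def, pv_flatMap_sing]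
  -- normalise A's append-folds to maps / flatMaps
  simp only [generate_weight_configurations, PySem.List.foldl_append_singleton_eq_map,
    List.append_assoc, PySem.List.foldl_append_eq_flatMap, List.nil_append,
    List.cons_append]
  refine congrArg₂ (· :: ·) rfl (congrArg₂ (· ++ ·) ?_ ?_)
  · -- degree-1 block
    apply List.map_congr_left
    intro i hi
    have h0 : (0:Int) ≤ i := (PySem.List.mem_pyRange_one.mp hi).1
    simp [pv_modify_rep]
  · -- degree-2 block
    apply List.flatMap_congr
    intro i hi
    obtain ⟨h0, hlt⟩ := PySem.List.mem_pyRange_one.mp hi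
    rw [PySem.List.pyRange_one_cons hlt]
    simp only [List.map_cons]
    congr 1
    · rw [pv_modify_rep, pv_modify_set_self]
    · apply List.map_congr_left
      intro j hj
      obtain ⟨hij, _⟩ := PySem.List.mem_pyRange_one.mp hj
      have hij' : i.toNat ≠ j.toNat := by omega
      rw [pv_modify_rep, pv_modify_set_ne _ _ _ hij']
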